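-- pv_equiv track=rewrite | github.com/j0nathanB/gitbook-to-mintlify | migrator/markdown_converter.py | _wrap_code_groups
-- ===== SOURCE A (Python) =====
-- def _wrap_code_groups(text: str) -> str:
--     """Wrap 2+ adjacent fenced code blocks with different languages in <CodeGroup>."""
--     lines = text.split('\n')
--     result = []
--     i = 0
--
--     while i < len(lines):
--         # Look for a fenced code block start
--         if lines[i].strip().startswith('```') and lines[i].strip() != '```':
--             # Collect consecutive code blocks (separated by blank lines)
--             blocks = []
--             block_start = i
--             while i < len(lines):
--                 opening = lines[i].strip()
--                 if not opening.startswith('```') or opening == '```':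
--                     break
--                 # Extract language from opening fence
--                 lang = opening.lstrip('`').split()[0] if opening.lstrip('`').split() else ''
--                 # Find the closing ```
--                 j = i + 1
--                 while j < len(lines) and lines[j].strip() != '```':
--                     j += 1
--                 if j >= len(lines):
--                     break  # unclosed block, bail
--                 blocks.append({
--                     'lang': lang,
--                     'start': i,
--                     'end': j,  # line with closing ```
--                 })
--                 # Skip past closing ``` and any blank lines
--                 k = j + 1
--                 while k < len(lines) and lines[k].strip() == '':
--                     k += 1
--                 # Check if next non-blank line is another code block
--                 if k < len(lines) and lines[k].strip().startswith('```') and lines[k].strip() != '```':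
--                     i = k
--                 else:
--                     break
--
--             if len(blocks) >= 2:
--                 # Check if languages differ
--                 langs = {b['lang'] for b in blocks}
--                 if len(langs) > 1:
--                     # Wrap in CodeGroup
--                     first = blocks[0]['start']
--                     last = blocks[-1]['end']
--                     # Output everything before the first block that we haven't output yet
--                     code_lines = lines[first:last + 1]
--                     result.append('<CodeGroup>')
--                     result.append('')
--                     result.extend(code_lines)
--                     result.append('')
--                     result.append('</CodeGroup>')
--                     i = last + 1
--                     continue
--                 else:
--                     # Same language — don't wrap, just output normally
--                     last = blocks[-1]['end']
--                     result.extend(lines[block_start:last + 1])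
--                     i = last + 1
--                     continue
--             else:
--                 # Single block, output normally
--                 last = blocks[-1]['end'] if blocks else i
--                 result.extend(lines[block_start:last + 1])
--                 i = last + 1
--                 continue
--
--         result.append(lines[i])
--         i += 1
--
--     return '\n'.join(result)
-- ===== SOURCE B (Python) =====
-- def _wrap_code_groups(text: str) -> str:
--     """Three passes: collect closed fence blocks, group blank-separated runs, emit by cursor."""
--     lines = text.split('\n')
--     n = len(lines)
--
--     def is_open(s):
--         return s.startswith('```') and s != '```'
--
--     def lang_of(s):
--         words = s.lstrip('`').split()
--         return words[0] if words else ''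
--
--     # Pass 1: one scan collecting every closed fenced block as (start, lang, end).
--     blocks = []
--     i = 0
--     while i < n:
--         s = lines[i].strip()
--         if is_open(s):
--             j = i + 1
--             while j < n and lines[j].strip() != '```':
--                 j += 1
--             if j < n:
--                 blocks.append((i, lang_of(s), j))
--                 i = j + 1
--                 continue
--         i += 1
--
--     # Pass 2: group consecutive blocks separated only by blank lines into runs.
--     def gap_blank(a, b):
--         return all(lines[x].strip() == '' for x in range(a, b))
--
--     def group(bs):
--         if not bs:
--             return []
--         run = [bs[0]]
--         rest = bs[1:]
--         while rest and gap_blank(run[-1][2] + 1, rest[0][0]):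
--             run.append(rest[0])
--             rest = rest[1:]
--         return [run] + group(rest)
--
--     runs = group(blocks)
--
--     # Pass 3: emit, run by run, with a cursor into lines.
--     out = []
--     cursor = 0
--     for run in runs:
--         first = run[0][0]
--         last = run[-1][2]
--         out.extend(lines[cursor:first])
--         body = lines[first:last + 1]
--         if len(run) >= 2 and len({lang for _, lang, _ in run}) > 1:
--             out.extend(['<CodeGroup>', ''] + body + ['', '</CodeGroup>'])
--         else:
--             out.extend(body)
--         cursor = last + 1
--     out.extend(lines[cursor:])
--     return '\n'.join(out)
-- ===== Notes on version B (the rewrite author's own statement) =====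
-- stated objective: alternative
-- what changed: A's single intertwined while-loop juggling i/j/k with an inner collect loop is replaced by three separate passes: one scan collecting every closed fence block as (start, lang, end) records, a grouping pass joining blocks separated only by blank lines into runs, and a cursor-based emission pass over the runs.
import Mathlib
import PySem

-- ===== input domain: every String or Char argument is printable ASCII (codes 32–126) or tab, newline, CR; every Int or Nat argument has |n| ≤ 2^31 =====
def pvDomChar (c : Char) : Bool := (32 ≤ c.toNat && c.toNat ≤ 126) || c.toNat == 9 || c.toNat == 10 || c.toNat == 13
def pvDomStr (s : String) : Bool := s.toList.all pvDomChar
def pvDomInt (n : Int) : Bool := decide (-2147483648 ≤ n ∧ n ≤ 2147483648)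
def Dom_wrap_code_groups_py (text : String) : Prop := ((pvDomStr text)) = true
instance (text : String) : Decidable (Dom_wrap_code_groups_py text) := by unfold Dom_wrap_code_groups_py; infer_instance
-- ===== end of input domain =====

-- B re-implements A's intertwined index-juggling loop as three passes (collect closed fence
-- blocks, group blank-separated runs, emit runs over a cursor): same return value, plainer structure.

-- ===== shared helpers (both Python versions contain these identical expressions) =====

-- lines[x].strip()
def pvStrip (lines : List String) (x : Nat) : String := PySem.Str.strip (lines.getD x "")

-- s.startswith('```') and s != '```'
def pvIsOpen (s : String) : Bool := PySem.Str.startswith s "```" && !(s == "```")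

-- s.lstrip('`').split()[0] if s.lstrip('`').split() else ''  — lstrip('`') ported by hand
-- (exact: it drops exactly the leading backticks)
def pvLang (s : String) : String :=
  match PySem.Str.split₀ (String.ofList (s.toList.dropWhile (· == '`'))) with
  | [] => ""
  | w :: _ => w

-- while j < len(lines) and lines[j].strip() != '```': j += 1   (identical inner loop in A and B)
def pvFindClose (lines : List String) (j : Nat) : Nat :=
  if j < lines.length then
    (if pvStrip lines j == "```" then j else pvFindClose lines (j + 1))
  else j
termination_by lines.length - j

theorem pvFindClose_ge (lines : List String) (j : Nat) : j ≤ pvFindClose lines j := by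
  unfold pvFindClose
  split
  · split
    · exact Nat.le_refl j
    · have := pvFindClose_ge lines (j + 1); omega
  · exact Nat.le_refl j
termination_by lines.length - j
decreasing_by omega

-- while k < len(lines) and lines[k].strip() == '': k += 1
def pvSkipBlank (lines : List String) (k : Nat) : Nat :=
  if k < lines.length then
    (if pvStrip lines k == "" then pvSkipBlank lines (k + 1) else k)
  else k
termination_by lines.length - k

theorem pvSkipBlank_ge (lines : List String) (k : Nat) : k ≤ pvSkipBlank lines k := by
  unfold pvSkipBlank
  split
  · split
    · have := pvSkipBlank_ge lines (k + 1); omega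
    · exact Nat.le_refl k
  · exact Nat.le_refl k
termination_by lines.length - k
decreasing_by omega

-- ===== PORT A =====

-- A's inner collect loop: the list `blocks` of (start, lang, end) gathered from index i
def pvCollect (lines : List String) (i : Nat) : List (Nat × String × Nat) :=
  if i < lines.length then
    let opening := pvStrip lines i
    if pvIsOpen opening then
      let lang := pvLang opening
      let j := pvFindClose lines (i + 1)
      if j < lines.length then
        let k := pvSkipBlank lines (j + 1)
        if k < lines.length && pvIsOpen (pvStrip lines k) then
          (i, lang, j) :: pvCollect lines k
        else [(i, lang, j)]
      else []  -- unclosed block, bail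
    else []
  else []
termination_by lines.length - i
decreasing_by
  have h1 := pvFindClose_ge lines (i + 1)
  have h2 := pvSkipBlank_ge lines (pvFindClose lines (i + 1) + 1)
  omega

theorem pvCollect_end_gt (lines : List String) (i : Nat) (d : Nat × String × Nat)
    (h : pvCollect lines i ≠ []) : i < ((pvCollect lines i).getLastD d).2.2 := by
  fun_induction pvCollect lines i with
  | case1 i hi opening hopen lang j hjlt k hcond ihk =>
    have hj1 := pvFindClose_ge lines (i + 1)
    have hjd : j = pvFindClose lines (i + 1) := rfl
    rw [← hjd] at hj1
    have hk1 := pvSkipBlank_ge lines (j + 1)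
    have hkd : k = pvSkipBlank lines (j + 1) := rfl
    rw [← hkd] at hk1
    rcases ht : pvCollect lines k with _ | ⟨b, tl⟩
    · simp only [List.getLastD_cons, List.getLastD_nil]
      omega
    · have h2 := ihk (by rw [ht]; simp)
      rw [ht] at h2
      simp only [List.getLastD_cons] at h2 ⊢
      omega
  | case2 i hi opening hopen lang j hjlt k hcond =>
    have hj1 := pvFindClose_ge lines (i + 1)
    have hjd : j = pvFindClose lines (i + 1) := rfl
    rw [← hjd] at hj1
    simp only [List.getLastD_cons, List.getLastD_nil]
    omega
  | case3 => simp at h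
  | case4 => simp at h
  | case5 => simp at h

-- A's main while-loop, from index i (result accumulator rendered as the returned list)
def pvALoop (lines : List String) (i : Nat) : List String :=
  if i < lines.length then
    if pvIsOpen (pvStrip lines i) then
      let blocks := pvCollect lines i
      if blocks.length ≥ 2 then
        if (PySem.Set.ofList (blocks.map (fun b => b.2.1))).length > 1 then
          let first := (blocks.headD (0, "", 0)).1
          let last := (blocks.getLastD (0, "", 0)).2.2
          ["<CodeGroup>", ""] ++ ((lines.drop first).take (last + 1 - first)) ++
            ["", "</CodeGroup>"] ++ pvALoop lines (last + 1)
        else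
          let last := (blocks.getLastD (0, "", 0)).2.2
          ((lines.drop i).take (last + 1 - i)) ++ pvALoop lines (last + 1)
      else
        let last := match blocks with | [] => i | _ => (blocks.getLastD (0, "", 0)).2.2
        ((lines.drop i).take (last + 1 - i)) ++ pvALoop lines (last + 1)
    else lines.getD i "" :: pvALoop lines (i + 1)
  else []
termination_by lines.length - i
decreasing_by
  · have := pvCollect_end_gt lines i (0, "", 0) (by
      rename_i h _; intro hnil; rw [show blocks = pvCollect lines i from rfl, hnil] at h; simp at h)
    show lines.length - (((pvCollect lines i).getLastD (0, "", 0)).2.2 + 1) < lines.length - i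
    omega
  · have := pvCollect_end_gt lines i (0, "", 0) (by
      rename_i h _; intro hnil; rw [show blocks = pvCollect lines i from rfl, hnil] at h; simp at h)
    show lines.length - (((pvCollect lines i).getLastD (0, "", 0)).2.2 + 1) < lines.length - i
    omega
  · rcases h : pvCollect lines i with _ | ⟨b, tl⟩
    · show lines.length - (i + 1) < lines.length - i
      rename_i hlt _ _
      omega
    · have := pvCollect_end_gt lines i (0, "", 0) (by rw [h]; simp)
      rw [h] at this
      show lines.length - (((b :: tl).getLastD (0, "", 0)).2.2 + 1) < lines.length - i
      omega
  · omega

-- the whole function: split, loop, join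
def wrap_code_groups_py (text : String) : String :=
  let lines := (PySem.Str.split? text "\n").getD [""]  -- sep "\n" ≠ "", so split? is never none
  PySem.Str.join "\n" (pvALoop lines 0)

-- ===== PORT B =====

-- pass 1: one scan collecting every closed fenced block as (start, lang, end)
def pvScan (lines : List String) (i : Nat) : List (Nat × String × Nat) :=
  if i < lines.length then
    let s := pvStrip lines i
    if pvIsOpen s then
      let j := pvFindClose lines (i + 1)
      if j < lines.length then (i, pvLang s, j) :: pvScan lines (j + 1)
      else pvScan lines (i + 1)
    else pvScan lines (i + 1)
  else []
termination_by lines.length - i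
decreasing_by
  · have := pvFindClose_ge lines (i + 1); omega
  · omega
  · omega

-- all(lines[x].strip() == '' for x in range(a, b))
def pvGapBlank (lines : List String) (a b : Nat) : Bool :=
  (List.range' a (b - a)).all (fun x => pvStrip lines x == "")

-- pass 2 inner while: peel off the blocks continuing the run whose last block ends at e
def pvRun (lines : List String) (e : Nat) (rest : List (Nat × String × Nat)) :
    List (Nat × String × Nat) × List (Nat × String × Nat) :=
  match rest with
  | [] => ([], [])
  | b :: tl =>
    if pvGapBlank lines (e + 1) b.1 then
      let p := pvRun lines b.2.2 tl
      (b :: p.1, p.2)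
    else ([], b :: tl)

theorem pvRun_snd_length (lines : List String) (e : Nat) (rest : List (Nat × String × Nat)) :
    (pvRun lines e rest).2.length ≤ rest.length := by
  induction rest generalizing e with
  | nil => simp [pvRun]
  | cons b tl ih =>
    simp only [pvRun]
    split
    · exact Nat.le_succ_of_le (ih b.2.2)
    · simp

-- pass 2: group consecutive blocks separated only by blank lines into runs
def pvRuns (lines : List String) (blocks : List (Nat × String × Nat)) :
    List (List (Nat × String × Nat)) :=
  match blocks with
  | [] => []
  | b :: tl =>
    let p := pvRun lines b.2.2 tl
    (b :: p.1) :: pvRuns lines p.2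
termination_by blocks.length
decreasing_by
  have := pvRun_snd_length lines b.2.2 tl
  simp at *
  omega

-- pass 3: emit, run by run, with a cursor into lines
def pvEmit (lines : List String) (cursor : Nat) (runs : List (List (Nat × String × Nat))) :
    List String :=
  match runs with
  | [] => lines.drop cursor
  | run :: rest =>
    let first := (run.headD (0, "", 0)).1
    let last := (run.getLastD (0, "", 0)).2.2
    let body := (lines.drop first).take (last + 1 - first)
    ((lines.drop cursor).take (first - cursor)) ++
      (if run.length ≥ 2 && (PySem.Set.ofList (run.map (fun b => b.2.1))).length > 1 then
        ["<CodeGroup>", ""] ++ body ++ ["", "</CodeGroup>"]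
      else body) ++
      pvEmit lines (last + 1) rest

def wrap_code_groups_py_alt (text : String) : String :=
  let lines := (PySem.Str.split? text "\n").getD [""]  -- sep "\n" ≠ "", so split? is never none
  PySem.Str.join "\n" (pvEmit lines 0 (pvRuns lines (pvScan lines 0)))

-- ===== PRECONDITION & SPEC =====
def Spec_wrap_code_groups_py (text : String) (out : String) : Prop := out = wrap_code_groups_py_alt text
instance (text : String) (out : String) : Decidable (Spec_wrap_code_groups_py text out) := by unfold Spec_wrap_code_groups_py; infer_instance

-- ===== CLAIM (what is proved, stated in full; the proofs are below) =====
def Claim_equal_wrap_code_groups_py : Prop := ∀ (text : String), Dom_wrap_code_groups_py text → Spec_wrap_code_groups_py text (wrap_code_groups_py text)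


-- ===== LEMMAS AND PROOFS =====

-- basic fact: a list's getLastD ignores the default once the list is nonempty
theorem pv_getLastD_cons_ne {α : Type} (a : α) (l : List α) (d : α) (h : l ≠ []) :
    (a :: l).getLastD d = l.getLastD d := by
  cases l with
  | nil => exact absurd rfl h
  | cons b tl => simp only [List.getLastD_cons]

-- pvFindClose / pvSkipBlank one-step equations
theorem pvFindClose_eq_self (lines : List String) (j : Nat) (hj : j < lines.length)
    (hs : pvStrip lines j = "```") : pvFindClose lines j = j := by
  conv_lhs => rw [pvFindClose]
  simp [hj, hs]

theorem pvFindClose_eq_succ (lines : List String) (j : Nat) (hj : j < lines.length)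
    (hs : ¬ pvStrip lines j = "```") : pvFindClose lines j = pvFindClose lines (j + 1) := by
  conv_lhs => rw [pvFindClose]
  simp [hj, hs]

theorem pvFindClose_eq_stop (lines : List String) (j : Nat) (hj : ¬ j < lines.length) :
    pvFindClose lines j = j := by
  conv_lhs => rw [pvFindClose]
  rw [if_neg hj]

theorem pvSkipBlank_eq_succ (lines : List String) (k : Nat) (hk : k < lines.length)
    (hs : pvStrip lines k = "") : pvSkipBlank lines k = pvSkipBlank lines (k + 1) := by
  conv_lhs => rw [pvSkipBlank]
  simp [hk, hs]

theorem pvSkipBlank_eq_self (lines : List String) (k : Nat)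
    (hs : ¬ (k < lines.length ∧ pvStrip lines k = "")) : pvSkipBlank lines k = k := by
  conv_lhs => rw [pvSkipBlank]
  by_cases hk : k < lines.length
  · rw [if_pos hk, if_neg (by simp; intro h; exact absurd ⟨hk, h⟩ hs)]
  · rw [if_neg hk]

-- pvFindClose points at the first closing fence at or after j (or past the end)
theorem pvFindClose_hit (lines : List String) (j : Nat)
    (h : pvFindClose lines j < lines.length) :
    pvStrip lines (pvFindClose lines j) = "```" := by
  by_cases hj : j < lines.length
  · by_cases hs : pvStrip lines j = "```"
    · rw [pvFindClose_eq_self lines j hj hs]; exact hs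
    · rw [pvFindClose_eq_succ lines j hj hs] at h ⊢
      exact pvFindClose_hit lines (j + 1) h
  · rw [pvFindClose_eq_stop lines j hj] at h; omega
termination_by lines.length - j
decreasing_by omega

theorem pvFindClose_not (lines : List String) (j x : Nat)
    (h1 : j ≤ x) (h2 : x < pvFindClose lines j) : pvStrip lines x ≠ "```" := by
  by_cases hj : j < lines.length
  · by_cases hs : pvStrip lines j = "```"
    · rw [pvFindClose_eq_self lines j hj hs] at h2; omega
    · rcases Nat.eq_or_lt_of_le h1 with rfl | hlt
      · exact hs
      · rw [pvFindClose_eq_succ lines j hj hs] at h2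
        exact pvFindClose_not lines (j + 1) x hlt h2
  · rw [pvFindClose_eq_stop lines j hj] at h2; omega
termination_by lines.length - j
decreasing_by omega

theorem pvFindClose_unclosed (lines : List String) (m m' : Nat)
    (h : lines.length ≤ pvFindClose lines m) (hm : m ≤ m') :
    lines.length ≤ pvFindClose lines m' := by
  by_contra hlt
  rw [Nat.not_le] at hlt
  have hhit := pvFindClose_hit lines m' hlt
  have hge := pvFindClose_ge lines m'
  exact pvFindClose_not lines m (pvFindClose lines m') (by omega) (by omega) hhit

-- pvSkipBlank skips exactly the blank lines
theorem pvSkipBlank_blank (lines : List String) (k x : Nat)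
    (h1 : k ≤ x) (h2 : x < pvSkipBlank lines k) : pvStrip lines x = "" := by
  by_cases hk : k < lines.length ∧ pvStrip lines k = ""
  · rcases Nat.eq_or_lt_of_le h1 with rfl | hlt
    · exact hk.2
    · rw [pvSkipBlank_eq_succ lines k hk.1 hk.2] at h2
      exact pvSkipBlank_blank lines (k + 1) x hlt h2
  · rw [pvSkipBlank_eq_self lines k hk] at h2; omega
termination_by lines.length - k
decreasing_by omega

theorem pvSkipBlank_stop (lines : List String) (k : Nat)
    (h : pvSkipBlank lines k < lines.length) :
    pvStrip lines (pvSkipBlank lines k) ≠ "" := by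
  by_cases hk : k < lines.length ∧ pvStrip lines k = ""
  · rw [pvSkipBlank_eq_succ lines k hk.1 hk.2] at h ⊢
    exact pvSkipBlank_stop lines (k + 1) h
  · rw [pvSkipBlank_eq_self lines k hk] at h ⊢
    intro hblank
    exact hk ⟨h, hblank⟩
termination_by lines.length - k
decreasing_by omega

-- a blank line does not open a fence
theorem pvIsOpen_blank (s : String) (h : s = "") : pvIsOpen s = false := by
  rw [h]; decide

-- pvScan one-step equations
theorem pvScan_stop (lines : List String) (i : Nat) (h : lines.length ≤ i) :
    pvScan lines i = [] := by
  unfold pvScan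
  rw [if_neg (by omega)]

theorem pvScan_skip (lines : List String) (i : Nat) (hi : i < lines.length)
    (ho : pvIsOpen (pvStrip lines i) = false) :
    pvScan lines i = pvScan lines (i + 1) := by
  conv_lhs => rw [pvScan]
  simp [hi, ho]

theorem pvScan_unclosed_step (lines : List String) (i : Nat) (hi : i < lines.length)
    (ho : pvIsOpen (pvStrip lines i) = true)
    (hj : ¬ pvFindClose lines (i + 1) < lines.length) :
    pvScan lines i = pvScan lines (i + 1) := by
  conv_lhs => rw [pvScan]
  simp [hi, ho, hj]

theorem pvScan_cons (lines : List String) (i : Nat) (hi : i < lines.length)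
    (ho : pvIsOpen (pvStrip lines i) = true)
    (hj : pvFindClose lines (i + 1) < lines.length) :
    pvScan lines i =
      (i, pvLang (pvStrip lines i), pvFindClose lines (i + 1)) ::
        pvScan lines (pvFindClose lines (i + 1) + 1) := by
  conv_lhs => rw [pvScan]
  simp [hi, ho, hj]

theorem pvScan_ge (lines : List String) (i : Nat) :
    ∀ b ∈ pvScan lines i, i ≤ b.1 := by
  intro b hb
  by_cases hi : i < lines.length
  · by_cases ho : pvIsOpen (pvStrip lines i) = true
    · by_cases hj : pvFindClose lines (i + 1) < lines.length
      · rw [pvScan_cons lines i hi ho hj, List.mem_cons] at hb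
        rcases hb with hb | hb
        · simp [hb]
        · have := pvScan_ge lines (pvFindClose lines (i + 1) + 1) b hb
          have := pvFindClose_ge lines (i + 1)
          omega
      · rw [pvScan_unclosed_step lines i hi ho hj] at hb
        have := pvScan_ge lines (i + 1) b hb
        omega
    · rw [pvScan_skip lines i hi (by simpa using ho)] at hb
      have := pvScan_ge lines (i + 1) b hb
      omega
  · rw [pvScan_stop lines i (by omega)] at hb
    simp at hb
termination_by lines.length - i
decreasing_by
  · have := pvFindClose_ge lines (i + 1); omega
  · omega
  · omega

theorem pvScan_skipBlank (lines : List String) (m : Nat) :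
    pvScan lines m = pvScan lines (pvSkipBlank lines m) := by
  by_cases hm : m < lines.length
  · by_cases hb : pvStrip lines m = ""
    · have hstep : pvScan lines m = pvScan lines (m + 1) :=
        pvScan_skip lines m hm (pvIsOpen_blank _ hb)
      rw [hstep, pvSkipBlank_eq_succ lines m hm hb]
      exact pvScan_skipBlank lines (m + 1)
    · rw [pvSkipBlank_eq_self lines m (by intro hc; exact hb hc.2)]
  · rw [pvSkipBlank_eq_self lines m (by intro hc; exact hm hc.1)]
termination_by lines.length - m
decreasing_by omega

theorem pvScan_nil_unclosed (lines : List String) (m m' : Nat)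
    (h : lines.length ≤ pvFindClose lines m) (hm : m ≤ m') :
    pvScan lines m' = [] := by
  by_cases hi : m' < lines.length
  · by_cases ho : pvIsOpen (pvStrip lines m') = true
    · have hj : ¬ pvFindClose lines (m' + 1) < lines.length := by
        have := pvFindClose_unclosed lines m (m' + 1) h (by omega)
        omega
      rw [pvScan_unclosed_step lines m' hi ho hj]
      exact pvScan_nil_unclosed lines m (m' + 1) h (by omega)
    · rw [pvScan_skip lines m' hi (by simpa using ho)]
      exact pvScan_nil_unclosed lines m (m' + 1) h (by omega)
  · exact pvScan_stop lines m' (by omega)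
termination_by lines.length - m'
decreasing_by
  · omega
  · omega

-- pvGapBlank characterization
theorem pvGapBlank_true (lines : List String) (a b : Nat)
    (h : ∀ x, a ≤ x → x < b → pvStrip lines x = "") : pvGapBlank lines a b = true := by
  unfold pvGapBlank
  rw [List.all_eq_true]
  intro x hx
  rw [List.mem_range'_1] at hx
  have := h x hx.1 (by omega)
  simp [this]

theorem pvGapBlank_false (lines : List String) (a b x : Nat)
    (h1 : a ≤ x) (h2 : x < b) (h : pvStrip lines x ≠ "") : pvGapBlank lines a b = false := by
  unfold pvGapBlank
  rw [List.all_eq_false]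
  refine ⟨x, ?_, by simpa using h⟩
  rw [List.mem_range'_1]
  omega

-- pvCollect one-step facts
theorem pvCollect_cons (lines : List String) (i : Nat) (hi : i < lines.length)
    (ho : pvIsOpen (pvStrip lines i) = true)
    (hj : pvFindClose lines (i + 1) < lines.length) :
    pvCollect lines i =
      (i, pvLang (pvStrip lines i), pvFindClose lines (i + 1)) :: (pvCollect lines i).tail := by
  conv_lhs => rw [pvCollect]
  simp only [hi, ho, hj, if_pos]
  split
  · conv_rhs => rw [pvCollect]
    simp only [hi, ho, hj, if_pos]
    rename_i hc
    rw [if_pos hc]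
    rfl
  · conv_rhs => rw [pvCollect]
    simp only [hi, ho, hj, if_pos]
    rename_i hc
    rw [if_neg hc]
    rfl

theorem pvCollect_nil_unclosed (lines : List String) (i : Nat)
    (ho : pvIsOpen (pvStrip lines i) = true)
    (hj : ¬ pvFindClose lines (i + 1) < lines.length) :
    pvCollect lines i = [] := by
  rw [pvCollect]
  split
  · simp [ho, hj]
  · rfl

-- emit moves one non-block line at a time
theorem pvEmit_step (lines : List String) (cursor : Nat)
    (runs : List (List (Nat × String × Nat))) (hc : cursor < lines.length)
    (hr : ∀ r rs, runs = r :: rs → cursor < (r.headD (0, "", 0)).1) :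
    pvEmit lines cursor runs = lines.getD cursor "" :: pvEmit lines (cursor + 1) runs := by
  cases runs with
  | nil =>
    simp only [pvEmit]
    rw [List.drop_eq_getElem_cons hc, List.getD_eq_getElem lines "" hc]
  | cons run rest =>
    have hf := hr run rest rfl
    simp only [pvEmit]
    rw [List.drop_eq_getElem_cons hc]
    have hsub : (run.headD (0, "", 0)).1 - cursor = ((run.headD (0, "", 0)).1 - (cursor + 1)) + 1 := by
      omega
    rw [hsub, List.take_succ_cons, List.getD_eq_getElem lines "" hc]
    simp

-- the run a fold of pvRun peels off is exactly what A's collect loop gathers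
theorem pv_run_eq (lines : List String) (i j : Nat)
    (hi : i < lines.length) (ho : pvIsOpen (pvStrip lines i) = true)
    (hjd : j = pvFindClose lines (i + 1)) (hj : j < lines.length) :
    pvRun lines j (pvScan lines (j + 1)) =
      ((pvCollect lines i).tail,
       pvScan lines (((pvCollect lines i).getLastD (0, "", 0)).2.2 + 1)) := by
  obtain ⟨k, hkd⟩ : ∃ k, k = pvSkipBlank lines (j + 1) := ⟨_, rfl⟩
  have hjge : i + 1 ≤ j := by rw [hjd]; exact pvFindClose_ge lines (i + 1)
  have hkge : j + 1 ≤ k := by rw [hkd]; exact pvSkipBlank_ge lines (j + 1)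
  have hscan : pvScan lines (j + 1) = pvScan lines k := by
    rw [hkd]; exact pvScan_skipBlank lines (j + 1)
  have hblank : ∀ x, j + 1 ≤ x → x < k → pvStrip lines x = "" := by
    intro x h1 h2
    rw [hkd] at h2
    exact pvSkipBlank_blank lines (j + 1) x h1 h2
  have hcol : pvCollect lines i =
      if (decide (k < lines.length) && pvIsOpen (pvStrip lines k)) = true then
        (i, pvLang (pvStrip lines i), j) :: pvCollect lines k
      else [(i, pvLang (pvStrip lines i), j)] := by
    conv_lhs => rw [pvCollect]
    simp only [hi, ho, if_pos]
    rw [← hjd, if_pos hj, ← hkd]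
  by_cases hcond : (decide (k < lines.length) && pvIsOpen (pvStrip lines k)) = true
  · rw [if_pos hcond] at hcol
    have hcond2 : k < lines.length ∧ pvIsOpen (pvStrip lines k) = true := by simpa using hcond
    have hk := hcond2.1
    have hok := hcond2.2
    have hgap : pvGapBlank lines (j + 1) k = true := pvGapBlank_true lines (j + 1) k hblank
    by_cases hj2 : pvFindClose lines (k + 1) < lines.length
    · -- the run continues with another closed block at k
      obtain ⟨t, ht⟩ : ∃ t, pvCollect lines k =
          (k, pvLang (pvStrip lines k), pvFindClose lines (k + 1)) :: t :=
        ⟨_, pvCollect_cons lines k hk hok hj2⟩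
      have hscank := pvScan_cons lines k hk hok hj2
      have ih := pv_run_eq lines k (pvFindClose lines (k + 1)) hk hok rfl hj2
      rw [hscan, hscank]
      simp only [pvRun]
      rw [if_pos (by simpa using hgap)]
      rw [ih, hcol, List.tail_cons, pv_getLastD_cons_ne _ _ _ (by rw [ht]; simp)]
      rw [ht, List.tail_cons]
    · -- the next block is unclosed: the run (and the scan) stop here
      have hcolk0 : pvCollect lines k = [] := pvCollect_nil_unclosed lines k hok hj2
      have hscan0 : pvScan lines k = [] := by
        rw [pvScan_unclosed_step lines k hk hok hj2]
        exact pvScan_nil_unclosed lines (k + 1) (k + 1) (by omega) (Nat.le_refl _)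
      rw [hscan, hscan0, hcol, hcolk0]
      simp only [pvRun, List.tail_cons, List.getLastD_cons, List.getLastD_nil]
      rw [hscan, hscan0]
  · rw [if_neg hcond] at hcol
    rw [hcol]
    simp only [List.tail_cons, List.getLastD_cons, List.getLastD_nil]
    cases hsc : pvScan lines (j + 1) with
    | nil => simp [pvRun]
    | cons b tl =>
      have hgapf : pvGapBlank lines (j + 1) b.1 = false := by
        by_cases hk : k < lines.length
        · have hok : pvIsOpen (pvStrip lines k) = false := by
            simp only [Bool.and_eq_true, decide_eq_true_eq, not_and] at hcond
            simpa using (Bool.eq_false_iff.mpr (by intro hc; exact absurd (hcond hk hc) (by simp)) : _)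
          have hnb : pvStrip lines k ≠ "" := by
            rw [hkd]
            exact pvSkipBlank_stop lines (j + 1) (by rw [← hkd]; exact hk)
          have hscan2 : pvScan lines k = pvScan lines (k + 1) := pvScan_skip lines k hk hok
          have hbmem : b ∈ pvScan lines (k + 1) := by
            rw [← hscan2, ← hscan, hsc]; simp
          have hge2 := pvScan_ge lines (k + 1) b hbmem
          exact pvGapBlank_false lines (j + 1) b.1 k (by omega) (by omega) hnb
        · exfalso
          have h0 : pvScan lines k = [] := pvScan_stop lines k (by omega)
          rw [hscan, h0] at hsc
          simp at hsc
      simp only [pvRun, hgapf]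
      rw [← hsc]
      simp
termination_by lines.length - i
decreasing_by omega

theorem pvRuns_head_ge (lines : List String) (m : Nat) (r : List (Nat × String × Nat))
    (rs : List (List (Nat × String × Nat)))
    (hr : pvRuns lines (pvScan lines m) = r :: rs) : m ≤ (r.headD (0, "", 0)).1 := by
  cases hsc : pvScan lines m with
  | nil => rw [hsc] at hr; simp [pvRuns] at hr
  | cons b tl =>
    rw [hsc] at hr
    simp only [pvRuns] at hr
    rw [List.cons.injEq] at hr
    have hb : b ∈ pvScan lines m := by rw [hsc]; simp
    have := pvScan_ge lines m b hb
    rw [← hr.1]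
    simpa using this

-- A's loop emits exactly what B's three passes emit
set_option maxHeartbeats 1600000 in
theorem pv_main (lines : List String) (i : Nat) :
    pvALoop lines i = pvEmit lines i (pvRuns lines (pvScan lines i)) := by
  by_cases hi : i < lines.length
  · by_cases ho : pvIsOpen (pvStrip lines i) = true
    · by_cases hj : pvFindClose lines (i + 1) < lines.length
      · obtain ⟨t, ht⟩ : ∃ t, pvCollect lines i =
            (i, pvLang (pvStrip lines i), pvFindClose lines (i + 1)) :: t :=
          ⟨_, pvCollect_cons lines i hi ho hj⟩
        have hend := pvCollect_end_gt lines i (0, "", 0) (by rw [ht]; simp)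
        have hrun := pv_run_eq lines i (pvFindClose lines (i + 1)) hi ho rfl hj
        rw [ht] at hend hrun
        simp only [List.tail_cons] at hrun
        have hscan := pvScan_cons lines i hi ho hj
        have ih := pv_main lines
          ((((i, pvLang (pvStrip lines i), pvFindClose lines (i + 1)) :: t).getLastD
              (0, "", 0)).2.2 + 1)
        have hruns : pvRuns lines (pvScan lines i) =
            ((i, pvLang (pvStrip lines i), pvFindClose lines (i + 1)) :: t) ::
              pvRuns lines (pvScan lines
                ((((i, pvLang (pvStrip lines i), pvFindClose lines (i + 1)) :: t).getLastD
                    (0, "", 0)).2.2 + 1)) := by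
          rw [hscan]
          simp only [pvRuns]
          rw [hrun]
        rw [hruns]
        conv_lhs => rw [pvALoop]
        simp only [hi, ho, if_pos]
        rw [ht]
        simp only [pvEmit, List.headD_cons]
        by_cases h2 : ((i, pvLang (pvStrip lines i), pvFindClose lines (i + 1)) :: t).length ≥ 2
        · by_cases h3 : (PySem.Set.ofList
              (((i, pvLang (pvStrip lines i), pvFindClose lines (i + 1)) :: t).map
                (fun b => b.2.1))).length > 1
          · rw [if_pos h2, if_pos h3, if_pos (by simp only [Bool.and_eq_true, decide_eq_true_eq]; exact And.intro h2 h3), ih]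
            try rw [Nat.sub_self, List.take_zero, List.nil_append]
            try simp only [List.append_assoc, List.cons_append, List.nil_append]
          · rw [if_pos h2, if_neg h3, if_neg (by simp only [Bool.and_eq_true, decide_eq_true_eq]; intro hc; exact h3 hc.2), ih]
            try rw [Nat.sub_self, List.take_zero, List.nil_append]
            try simp only [List.append_assoc, List.cons_append, List.nil_append]
        · rw [if_neg h2, if_neg (by simp only [Bool.and_eq_true, decide_eq_true_eq]; intro hc; exact h2 hc.1), ih]
          try rw [Nat.sub_self, List.take_zero, List.nil_append]
          try simp only [List.append_assoc, List.cons_append, List.nil_append]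
      · have hcol0 : pvCollect lines i = [] := pvCollect_nil_unclosed lines i ho hj
        have hstep : pvScan lines i = pvScan lines (i + 1) := pvScan_unclosed_step lines i hi ho hj
        have ih := pv_main lines (i + 1)
        conv_lhs => rw [pvALoop]
        simp only [hi, ho, if_pos, hcol0]
        rw [hstep, pvEmit_step lines i _ hi (fun r rs hr => by
          have := pvRuns_head_ge lines (i + 1) r rs hr; omega), ← ih]
        rw [if_neg (by simp)]
        have h1 : i + 1 - i = 1 := by omega
        have htk : List.take 1 (List.drop i lines) = [lines.getD i ""] := by
          rw [List.drop_eq_getElem_cons hi, List.getD_eq_getElem lines "" hi]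
          rfl
        rw [h1, htk, List.singleton_append]
    · have hstep : pvScan lines i = pvScan lines (i + 1) :=
        pvScan_skip lines i hi (by simpa using ho)
      have ih := pv_main lines (i + 1)
      conv_lhs => rw [pvALoop]
      simp only [hi, if_pos]
      rw [if_neg (by simpa using ho)]
      rw [hstep, pvEmit_step lines i _ hi (fun r rs hr => by
        have := pvRuns_head_ge lines (i + 1) r rs hr; omega), ← ih]
  · rw [pvScan_stop lines i (by omega)]
    conv_lhs => rw [pvALoop]
    rw [if_neg hi]
    simp [pvRuns, pvEmit, List.drop_eq_nil_of_le (by omega : lines.length ≤ i)]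
termination_by lines.length - i
decreasing_by
  · have h2 := pvCollect_end_gt lines i (0, "", 0) (by rw [ht]; simp)
    rw [ht] at h2
    omega
  · omega
  · omega

-- ===== VERDICT (by name: the statement is the Claim_ definition above) =====
theorem wrap_code_groups_py_spec : Claim_equal_wrap_code_groups_py := by
  intro text _
  unfold Spec_wrap_code_groups_py wrap_code_groups_py wrap_code_groups_py_alt
  simp only [pv_main]
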